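-- pv_equiv track=rewrite | github.com/leptogenesis/OnyxPdfToWrite | pdftowrite.py | pagesize
-- ===== SOURCE A (Python) =====
-- def pagesize(name):
--    """this function returns the page sizes given in Write. adding an l at the end, converts it to landscape. If no know size is given
--       it defaults to A4"""
--    match name:
--       case "A4":
--          return [1240,1755]
--       case "A4l":
--          return [1755,1240]
--       case "Letter":
--          return [1275,1650]
--       case "Letterl":
--          return [1650,1275]
--       case "Screen":
--          return [810, 1170]
--       case "Screenl":
--          return [1170,810]
--       case _:
--          return pagesize("A4")
-- ===== SOURCE B (Python) =====
-- _SIZES = {'A4': [1240, 1755], 'Letter': [1275, 1650], 'Screen': [810, 1170]}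
--
--
-- def pagesize(name):
--     """Table-driven variant: portrait sizes live in one dict; a landscape
--     suffix on a known base name transposes it; anything else defaults to A4."""
--     if name in _SIZES:
--         return list(_SIZES[name])
--     if name.endswith('l') and name[:-1] in _SIZES:
--         return _SIZES[name[:-1]][::-1]
--     return list(_SIZES['A4'])
-- ===== Notes on version B (the rewrite author's own statement) =====
-- stated objective: simpler
-- what changed: Replaces the six-way literal match (with a recursive default call) by one portrait-size dict plus a landscape-suffix transpose and an A4 default.
import Mathlib
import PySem

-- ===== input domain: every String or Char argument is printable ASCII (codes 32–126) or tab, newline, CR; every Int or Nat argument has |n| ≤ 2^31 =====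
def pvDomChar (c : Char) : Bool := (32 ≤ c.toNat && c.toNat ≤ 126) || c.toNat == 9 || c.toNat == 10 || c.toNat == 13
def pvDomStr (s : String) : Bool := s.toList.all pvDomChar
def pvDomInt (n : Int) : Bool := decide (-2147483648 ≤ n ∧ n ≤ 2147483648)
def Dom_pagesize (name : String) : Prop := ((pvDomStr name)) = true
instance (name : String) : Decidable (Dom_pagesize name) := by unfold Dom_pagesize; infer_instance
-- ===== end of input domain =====

-- B replaces A's six-way literal match by one portrait-size dict plus a landscape-suffix
-- transpose and an A4 default (objective: simpler).

-- ===== PORT A =====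
-- A's 'match' on string literals, written as the equivalent if-chain; the default
-- branch is A's recursive call pagesize("A4"), which returns [1240,1755]: inlined
-- as that literal for termination.
def pagesize (name : String) : List Int :=
  if name = "A4" then [1240, 1755]
  else if name = "A4l" then [1755, 1240]
  else if name = "Letter" then [1275, 1650]
  else if name = "Letterl" then [1650, 1275]
  else if name = "Screen" then [810, 1170]
  else if name = "Screenl" then [1170, 810]
  else [1240, 1755]  -- pagesize("A4")

-- ===== PORT B =====
def pvSizes : PySem.Dict String (List Int) :=
  PySem.Dict.ofList [("A4", [1240, 1755]), ("Letter", [1275, 1650]), ("Screen", [810, 1170])]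

def pagesize_alt (name : String) : List Int :=
  if PySem.Dict.contains pvSizes name then PySem.Dict.getD pvSizes name []
  else if PySem.Str.endswith name "l"
          && PySem.Dict.contains pvSizes (PySem.Str.slice name none (some (-1))) then
    -- v[::-1] is List.reverse (PySem.List.slice?_none_none_neg_one)
    (PySem.Dict.getD pvSizes (PySem.Str.slice name none (some (-1))) []).reverse
  else PySem.Dict.getD pvSizes "A4" []

-- ===== PRECONDITION & SPEC =====
def Spec_pagesize (name : String) (out : List Int) : Prop := out = pagesize_alt name
instance (name : String) (out : List Int) : Decidable (Spec_pagesize name out) := by unfold Spec_pagesize; infer_instance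

-- ===== CLAIM (what is proved, stated in full; the proofs are below) =====
def Claim_equal_pagesize : Prop := ∀ (name : String), Dom_pagesize name → Spec_pagesize name (pagesize name)

-- ===== LEMMAS AND PROOFS =====

-- The literal dict pvSizes, unfolded.
lemma pvSizes_mk : pvSizes = PySem.Dict.mk
    [("A4", [1240, 1755]), ("Letter", [1275, 1650]), ("Screen", [810, 1170])] := by decide

lemma contains_pvSizes (name : String) :
    PySem.Dict.contains pvSizes name
      = decide ("A4" = name ∨ "Letter" = name ∨ "Screen" = name) := by
  rw [pvSizes_mk]
  simp only [PySem.Dict.contains_mk]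
  by_cases h1 : "A4" = name <;> by_cases h2 : "Letter" = name <;>
    by_cases h3 : "Screen" = name <;> simp_all

-- If name ends in 'l' and name[:-1] = b, then name = b + "l" (on code points).
lemma name_eq_of_endswith_l (name b : String)
    (h1 : PySem.Str.endswith name "l" = true)
    (h2 : PySem.Str.slice name none (some (-1)) = b) :
    name.toList = b.toList ++ ['l'] := by
  simp at h1
  obtain ⟨t, ht⟩ := (PySem.Chars.endswith_iff _ _).mp h1
  have hb : b.toList = name.toList.dropLast := by
    rw [← h2]; exact PySem.Str.slice_to_neg_one name
  rw [← ht, List.dropLast_concat] at hb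
  rw [← ht, hb]

theorem pagesize_eq (name : String) : pagesize name = pagesize_alt name := by
  by_cases hA4 : name = "A4"; · subst hA4; decide
  by_cases hA4l : name = "A4l"; · subst hA4l; decide
  by_cases hLe : name = "Letter"; · subst hLe; decide
  by_cases hLel : name = "Letterl"; · subst hLel; decide
  by_cases hSc : name = "Screen"; · subst hSc; decide
  by_cases hScl : name = "Screenl"; · subst hScl; decide
  have hc : PySem.Dict.contains pvSizes name = false := by
    rw [contains_pvSizes]
    simp only [decide_eq_false_iff_not]
    push Not
    exact ⟨fun h => hA4 h.symm, fun h => hLe h.symm, fun h => hSc h.symm⟩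
  rw [pagesize, pagesize_alt, hc]
  simp only [if_neg hA4, if_neg hA4l, if_neg hLe, if_neg hLel, if_neg hSc, if_neg hScl,
    Bool.false_eq_true, if_false]
  by_cases he : PySem.Str.endswith name "l" = true
  · have hb : PySem.Dict.contains pvSizes (PySem.Str.slice name none (some (-1))) = false := by
      rw [contains_pvSizes]
      have k : ∀ b : String, PySem.Str.slice name none (some (-1)) = b →
          name.toList ≠ b.toList ++ ['l'] → False := fun b h2 hne =>
        hne (name_eq_of_endswith_l name b he h2)
      simp only [decide_eq_false_iff_not]
      rintro (h2 | h2 | h2)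
      · exact k _ h2.symm (fun h => hA4l (String.toList_inj.mp h))
      · exact k _ h2.symm (fun h => hLel (String.toList_inj.mp h))
      · exact k _ h2.symm (fun h => hScl (String.toList_inj.mp h))
    rw [he, hb]
    simp only [Bool.and_false, Bool.false_eq_true, if_false]
    decide
  · simp only [Bool.not_eq_true] at he
    rw [he]
    simp only [Bool.false_and, Bool.false_eq_true, if_false]
    decide

-- ===== VERDICT (by name: the statement is the Claim_ definition above) =====
theorem pagesize_spec : Claim_equal_pagesize := by
  intro name _
  exact pagesize_eq name
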